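-- pv_equiv track=rewrite | github.com/byaminov/advent-of-code-2018 | aoc/day13.py | parse
-- ===== SOURCE A (Python) =====
-- def parse(text):
--     tracks = text.split('\n')
--     carts = dict()
--     cart_id = 0
--     max_width = 0
--     for y, row in enumerate(tracks):
--         max_width = max(len(row), max_width)
--         for x, char in enumerate(row):
--             if char in ['v', '^', '>', '<']:
--                 carts[cart_id] = ((y, x), char, 'left')
--                 cart_id += 1
--                 if char in ['>', '<']:
--                     tracks[y] = tracks[y][:x] + '-' + tracks[y][x + 1:]
--                 else:
--                     tracks[y] = tracks[y][:x] + '|' + tracks[y][x + 1:]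
--     return carts, tracks, max_width
-- ===== SOURCE B (Python) =====
-- def parse(text):
--     rows = text.split('\n')
--     carts = {}
--     triples = [(y, x, ch)
--                for y, row in enumerate(rows)
--                for x, ch in enumerate(row)
--                if ch in '^v<>']
--     for cart_id, (y, x, ch) in enumerate(triples):
--         carts[cart_id] = ((y, x), ch, 'left')
--     table = str.maketrans({'^': '|', 'v': '|', '<': '-', '>': '-'})
--     tracks = [row.translate(table) for row in rows]
--     max_width = max((len(r) for r in rows), default=0)
--     return carts, tracks, max_width
-- ===== Notes on version B (the rewrite author's own statement) =====
-- stated objective: simpler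
-- what changed: B replaces A's single interleaved mutating pass (per-cart slice-and-rebuild of the track row inside the cart scan) by two independent passes: one comprehension collecting cart positions, and one str.translate per row for the normalized tracks; max width is a plain max over row lengths.
import Mathlib
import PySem

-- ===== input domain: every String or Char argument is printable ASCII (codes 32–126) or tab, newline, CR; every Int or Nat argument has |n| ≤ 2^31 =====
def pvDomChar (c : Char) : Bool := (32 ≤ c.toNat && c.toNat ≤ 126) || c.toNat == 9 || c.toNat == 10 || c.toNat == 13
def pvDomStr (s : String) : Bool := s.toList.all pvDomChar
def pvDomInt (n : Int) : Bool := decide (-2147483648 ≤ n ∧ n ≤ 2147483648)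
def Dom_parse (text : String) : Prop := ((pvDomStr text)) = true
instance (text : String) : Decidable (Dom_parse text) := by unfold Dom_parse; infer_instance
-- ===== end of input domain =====

-- B replaces A's single interleaved mutating pass with two independent passes (collect carts, then
-- translate each row); equal return values are proved on all inputs (objective: simpler).

-- ===== PORT A =====
-- rows are handled as List Char (code points), turned back into String only at the return;
-- the dict 'carts' is a PySem.Dict keyed by the integer cart id.

abbrev PvCart := (Int × Int) × String × String

-- char in ['v', '^', '>', '<']
def pvIsCartA (c : Char) : Bool := c == 'v' || c == '^' || c == '>' || c == '<'

-- the inner 'for x, char in enumerate(row)' loop body; state = (carts, cart_id, tracks)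
def pvAInner (y : Int) :
    PySem.Dict Int PvCart × Int × List (List Char) → Int × Char →
    PySem.Dict Int PvCart × Int × List (List Char)
  | (carts, cart_id, tracks), (x, char) =>
    if pvIsCartA char then
      let carts := carts.insert cart_id ((y, x), String.singleton char, "left")
      let row := PySem.List.pyGetD tracks y []       -- tracks[y]; y is an enumerate index, in range
      let mid : Char := if char == '>' || char == '<' then '-' else '|'
      let newRow := PySem.List.slice row none (some x) ++ [mid] ++
                    PySem.List.slice row (some (x + 1)) none
      (carts, cart_id + 1, PySem.List.pySetD tracks y newRow)   -- tracks[y] = …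
    else
      (carts, cart_id, tracks)

-- the outer 'for y, row in enumerate(tracks)' loop body; state also carries max_width
def pvAOuter :
    PySem.Dict Int PvCart × Int × List (List Char) × Int → Int × List Char →
    PySem.Dict Int PvCart × Int × List (List Char) × Int
  | (carts, cart_id, tracks, maxw), (y, row) =>
    let maxw := max (row.length : Int) maxw
    let res := (PySem.List.enumerate row 0).foldl (pvAInner y) (carts, cart_id, tracks)
    (res.1, res.2.1, res.2.2, maxw)

def parse (text : String) : (List (Int × PvCart)) × List String × Int :=
  let rows := PySem.Chars.splitOn text.toList ['\n']
  let res := (PySem.List.enumerate rows 0).foldl pvAOuter (PySem.Dict.empty, 0, rows, 0)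
  (res.1.items, res.2.2.1.map String.ofList, res.2.2.2)

-- ===== PORT B =====
-- ch in '^v<>'
def pvIsCartB (c : Char) : Bool := c == '^' || c == 'v' || c == '<' || c == '>'

-- str.maketrans({'^': '|', 'v': '|', '<': '-', '>': '-'}) applied to one character
def pvTrans (c : Char) : Char :=
  if c == '^' then '|' else if c == 'v' then '|'
  else if c == '<' then '-' else if c == '>' then '-' else c

def parse_alt (text : String) : (List (Int × PvCart)) × List String × Int :=
  let rows := PySem.Chars.splitOn text.toList ['\n']
  let triples := (PySem.List.enumerate rows 0).flatMap
      (fun p => ((PySem.List.enumerate p.2 0).filter (fun q => pvIsCartB q.2)).map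
        (fun q => (p.1, q.1, q.2)))
  let carts := (PySem.List.enumerate triples 0).map
      (fun e => (e.1, ((e.2.1, e.2.2.1), String.singleton e.2.2.2, "left")))
  let tracks := rows.map (fun r => r.map pvTrans)
  let maxw := (rows.map (fun r => (r.length : Int))).foldl max 0
  (carts, tracks.map String.ofList, maxw)

-- ===== PRECONDITION & SPEC =====
def Spec_parse (text : String) (out : (List (Int × (Int × Int) × String × String)) × List String × Int) : Prop := out = parse_alt text
instance (text : String) (out : (List (Int × (Int × Int) × String × String)) × List String × Int) : Decidable (Spec_parse text out) := by unfold Spec_parse; infer_instance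

-- ===== CLAIM (what is proved, stated in full; the proofs are below) =====
def Claim_equal_parse : Prop := ∀ (text : String), Dom_parse text → Spec_parse text (parse text)

-- ===== LEMMAS AND PROOFS =====

-- the carts contributed by one row, seen at row y starting at column x with first fresh id
def pvRowCarts (y x id : Int) : List Char → List (Int × PvCart)
  | [] => []
  | c :: cs =>
    if pvIsCartA c then (id, ((y, x), String.singleton c, "left")) :: pvRowCarts y (x + 1) (id + 1) cs
    else pvRowCarts y (x + 1) id cs

-- the carts of all rows, starting at row y with first fresh id
def pvAllCarts (y id : Int) : List (List Char) → List (Int × PvCart)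
  | [] => []
  | r :: rs => pvRowCarts y 0 id r ++ pvAllCarts (y + 1) (id + ((r.filter pvIsCartA).length : Int)) rs

lemma pvIsCartB_eq (c : Char) : pvIsCartB c = pvIsCartA c := by
  simp only [pvIsCartA, pvIsCartB, Bool.or_comm, Bool.or_left_comm]

lemma pvMid_eq (c : Char) (hc : pvIsCartA c = true) :
    (if c == '>' || c == '<' then '-' else '|') = pvTrans c := by
  simp only [pvIsCartA, Bool.or_eq_true, beq_iff_eq] at hc
  rcases hc with ((h | h) | h) | h <;> subst h <;> decide

lemma pvTrans_id (c : Char) (hc : pvIsCartA c = false) : pvTrans c = c := by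
  simp only [pvIsCartA, Bool.or_eq_false_iff, beq_eq_false_iff_ne, ne_eq] at hc
  obtain ⟨⟨⟨h1, h2⟩, h3⟩, h4⟩ := hc
  simp [pvTrans, h1, h2, h3, h4]

-- A's inner loop over one row: appends that row's carts and translates tracks[n]
lemma pvInnerA_spec (r : List Char) (n : Nat) (x0 : Nat) (pre : List Char)
    (carts : PySem.Dict Int PvCart) (id : Int) (tracks : List (List Char))
    (hn : n < tracks.length) (hpre : pre.length = x0)
    (ht : tracks[n] = pre ++ r)
    (hk : ∀ k ∈ carts.keys, k < id) :
    ∃ D, (PySem.List.enumerate r (x0 : Int)).foldl (pvAInner (n : Int)) (carts, id, tracks) =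
        (D, id + ((r.filter pvIsCartA).length : Int), tracks.set n (pre ++ r.map pvTrans)) ∧
      D.items = carts.items ++ pvRowCarts (n : Int) (x0 : Int) id r ∧
      ∀ k ∈ D.keys, k < id + ((r.filter pvIsCartA).length : Int) := by
  induction r generalizing x0 pre carts id tracks with
  | nil =>
    refine ⟨carts, ?_, by simp [pvRowCarts], by simpa using hk⟩
    simp only [PySem.List.enumerate_nil, List.foldl_nil, List.filter_nil, List.length_nil,
      Nat.cast_zero, add_zero, List.map_nil, List.append_nil]
    rw [show pre = tracks[n] by simp [ht], List.set_getElem_self]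
  | cons c cs ih =>
    rw [PySem.List.enumerate_cons, List.foldl_cons]
    by_cases hc : pvIsCartA c = true
    · -- a cart glyph: record it and rewrite tracks[n]
      have hcontains : carts.contains id = false := by
        rw [← Bool.not_eq_true, PySem.Dict.contains_iff_mem_keys]
        intro hmem; exact absurd (hk id hmem) (lt_irrefl id)
      have hstep : pvAInner (n : Int) (carts, id, tracks) ((x0 : Int), c) =
          (carts.insert id (((n : Int), (x0 : Int)), String.singleton c, "left"), id + 1,
            tracks.set n (pre ++ pvTrans c :: cs)) := by
        simp only [pvAInner, hc, if_true]
        have hrow : PySem.List.pyGetD tracks (n : Int) [] = pre ++ c :: cs := by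
          rw [PySem.List.pyGetD_natCast, List.getD_eq_getElem _ _ hn, ht]
        have h1 : PySem.List.slice (pre ++ c :: cs) none (some (x0 : Int)) = pre := by
          rw [PySem.List.slice_to_natCast, ← hpre, List.take_left]
        have h2 : PySem.List.slice (pre ++ c :: cs) (some ((x0 : Int) + 1)) none = cs := by
          rw [show ((x0 : Int) + 1) = ((x0 + 1 : Nat) : Int) by push_cast; ring,
            PySem.List.slice_from_natCast,
            show pre ++ c :: cs = (pre ++ [c]) ++ cs by simp,
            List.drop_left' (by simp [hpre])]
        rw [hrow, h1, h2, pvMid_eq c hc]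
        simp
      rw [hstep]
      have hlen' : n < (tracks.set n (pre ++ pvTrans c :: cs)).length := by simpa using hn
      obtain ⟨D, hfold, hitems, hkey⟩ :=
        ih (x0 + 1) (pre ++ [pvTrans c])
          (carts.insert id (((n : Int), (x0 : Int)), String.singleton c, "left")) (id + 1)
          (tracks.set n (pre ++ pvTrans c :: cs)) hlen' (by simp [hpre])
          (by simp)
          (by
            intro k hmem
            rw [PySem.Dict.keys_insert_of_not_contains _ _ hcontains] at hmem
            rcases List.mem_append.mp hmem with h | h
            · exact lt_trans (hk k h) (by omega)
            · simp at h; omega)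
      refine ⟨D, ?_, ?_, ?_⟩
      · rw [show ((x0 : Int) + 1) = ((x0 + 1 : Nat) : Int) by push_cast; ring, hfold,
          List.set_set]
        refine congrArg (Prod.mk D) (congrArg₂ Prod.mk ?_ ?_)
        · rw [List.filter_cons_of_pos hc, List.length_cons]; push_cast; ring
        · simp
      · rw [hitems, PySem.Dict.items_insert_of_not_contains _ _ hcontains]
        simp only [pvRowCarts]
        rw [if_pos hc]
        push_cast
        simp [List.append_assoc]
      · intro k hmem
        have h := hkey k hmem
        rw [List.filter_cons_of_pos hc, List.length_cons]
        push_cast at h ⊢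
        omega
    · -- not a cart: the state is unchanged, the prefix grows by the untouched character
      have hc' : pvIsCartA c = false := by simpa using hc
      have hstep : pvAInner (n : Int) (carts, id, tracks) ((x0 : Int), c) = (carts, id, tracks) := by
        simp [pvAInner, hc']
      rw [hstep]
      obtain ⟨D, hfold, hitems, hkey⟩ :=
        ih (x0 + 1) (pre ++ [c]) carts id tracks hn (by simp [hpre]) (by simpa using ht) hk
      refine ⟨D, ?_, ?_, ?_⟩
      · rw [show ((x0 : Int) + 1) = ((x0 + 1 : Nat) : Int) by push_cast; ring, hfold]
        simp [hc', pvTrans_id c hc']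
      · rw [hitems]
        simp only [pvRowCarts]
        rw [if_neg (by simp [hc'])]
        push_cast
        rfl
      · intro k hmem
        have h := hkey k hmem
        simpa [List.filter_cons, hc'] using h

-- writing tracks[y] back at the current row index
lemma pvSetMid {α : Type} (pre rs : List α) (y v : α) :
    (pre ++ y :: rs).set pre.length v = pre ++ v :: rs := by
  induction pre with
  | nil => rfl
  | cons a l ih => simp [ih]

-- A's outer loop
lemma pvOuterA_spec (rows : List (List Char)) (pre : List (List Char))
    (carts : PySem.Dict Int PvCart) (id maxw : Int)
    (hk : ∀ k ∈ carts.keys, k < id) :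
    ∃ D cid, (PySem.List.enumerate rows (pre.length : Int)).foldl pvAOuter (carts, id, pre ++ rows, maxw) =
        (D, cid, pre ++ rows.map (fun r => r.map pvTrans),
          rows.foldl (fun m r => max (r.length : Int) m) maxw) ∧
      D.items = carts.items ++ pvAllCarts (pre.length : Int) id rows := by
  induction rows generalizing pre carts id maxw with
  | nil => exact ⟨carts, id, by simp, by simp [pvAllCarts]⟩
  | cons r rs ih =>
    rw [PySem.List.enumerate_cons, List.foldl_cons]
    have hn : pre.length < (pre ++ r :: rs).length := by simp
    have ht : (pre ++ r :: rs)[pre.length]'hn = ([] : List Char) ++ r := by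
      simp [List.getElem_append_right]
    obtain ⟨D1, hfold1, hitems1, hkey1⟩ :=
      pvInnerA_spec r pre.length 0 [] carts id (pre ++ r :: rs) hn rfl ht hk
    have hstep : pvAOuter (carts, id, pre ++ r :: rs, maxw) ((pre.length : Int), r) =
        (D1, id + ((r.filter pvIsCartA).length : Int), pre ++ r.map pvTrans :: rs,
          max (r.length : Int) maxw) := by
      simp only [pvAOuter]
      rw [show (0 : Int) = ((0 : Nat) : Int) from rfl, hfold1]
      simp only [List.nil_append]
      rw [pvSetMid]
    rw [hstep]
    obtain ⟨D, cid, hfold, hitems⟩ :=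
      ih (pre ++ [r.map pvTrans]) D1 (id + ((r.filter pvIsCartA).length : Int))
        (max (r.length : Int) maxw) hkey1
    refine ⟨D, cid, ?_, ?_⟩
    · rw [show (pre.length : Int) + 1 = (((pre ++ [r.map pvTrans]).length : Nat) : Int) by
          simp, List.append_cons pre (r.map pvTrans) rs, hfold]
      simp
    · rw [hitems, hitems1]
      simp [pvAllCarts, List.append_assoc]

-- B's carts list equals the per-row decomposition
lemma pvRowCartsB (r : List Char) (y : Int) (x0 : Nat) (id : Int) :
    (PySem.List.enumerate (((PySem.List.enumerate r (x0 : Int)).filter (fun q => pvIsCartB q.2)).map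
        (fun q => (y, q.1, q.2))) id).map
      (fun e => (e.1, ((e.2.1, e.2.2.1), String.singleton e.2.2.2, "left"))) =
    pvRowCarts y (x0 : Int) id r := by
  induction r generalizing x0 id with
  | nil => simp [PySem.List.enumerate_nil, pvRowCarts]
  | cons c cs ih =>
    rw [PySem.List.enumerate_cons]
    by_cases hc : pvIsCartA c = true
    · have hcB : pvIsCartB c = true := by rw [pvIsCartB_eq]; exact hc
      rw [List.filter_cons_of_pos (by simpa using hcB), List.map_cons,
        PySem.List.enumerate_cons, List.map_cons]
      simp only [pvRowCarts]
      rw [if_pos hc, show (x0 : Int) + 1 = ((x0 + 1 : Nat) : Int) by push_cast; ring]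
      exact congrArg (List.cons _) (ih (x0 + 1) (id + 1))
    · have hcB : pvIsCartB c = false := by rw [pvIsCartB_eq]; simpa using hc
      rw [List.filter_cons_of_neg (by simpa using hcB)]
      simp only [pvRowCarts]
      rw [if_neg (by simpa using hc), show (x0 : Int) + 1 = ((x0 + 1 : Nat) : Int) by
        push_cast; ring]
      exact ih (x0 + 1) id

lemma pvFilterEnumLen (r : List Char) (s : Int) :
    (((PySem.List.enumerate r s).filter (fun q => pvIsCartB q.2)).length) =
    (r.filter pvIsCartA).length := by
  induction r generalizing s with
  | nil => simp [PySem.List.enumerate_nil]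
  | cons c cs ih =>
    by_cases hc : pvIsCartA c = true
    · have hcB : pvIsCartB c = true := by rw [pvIsCartB_eq]; exact hc
      simp [PySem.List.enumerate_cons, hcB, hc, ih]
    · have hcB : pvIsCartB c = false := by rw [pvIsCartB_eq]; simpa using hc
      simp [PySem.List.enumerate_cons, hcB, hc, ih]

lemma pvAllCartsB (rows : List (List Char)) (y0 : Nat) (id : Int) :
    (PySem.List.enumerate ((PySem.List.enumerate rows (y0 : Int)).flatMap
        (fun p => ((PySem.List.enumerate p.2 0).filter (fun q => pvIsCartB q.2)).map
          (fun q => (p.1, q.1, q.2)))) id).map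
      (fun e => (e.1, ((e.2.1, e.2.2.1), String.singleton e.2.2.2, "left"))) =
    pvAllCarts (y0 : Int) id rows := by
  induction rows generalizing y0 id with
  | nil => simp [PySem.List.enumerate_nil, pvAllCarts]
  | cons r rs ih =>
    rw [PySem.List.enumerate_cons]
    simp only [List.flatMap_cons]
    rw [PySem.List.enumerate_append, List.map_append]
    have hlen : (((PySem.List.enumerate r 0).filter (fun q => pvIsCartB q.2)).map
        (fun q => ((y0 : Int), q.1, q.2))).length = (r.filter pvIsCartA).length := by
      rw [List.length_map]; exact pvFilterEnumLen r 0
    simp only [pvAllCarts]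
    congr 1
    · have h := pvRowCartsB r (y0 : Int) 0 id
      simpa using h
    · rw [hlen, show (y0 : Int) + 1 = ((y0 + 1 : Nat) : Int) by push_cast; ring]
      exact ih (y0 + 1) (id + ((r.filter pvIsCartA).length : Int))

lemma pvMaxFold (rows : List (List Char)) (m : Int) :
    rows.foldl (fun m r => max (r.length : Int) m) m =
    (rows.map (fun r => (r.length : Int))).foldl max m := by
  induction rows generalizing m with
  | nil => rfl
  | cons r rs ih => simp only [List.foldl_cons, List.map_cons]; rw [ih, max_comm]

-- ===== VERDICT (by name: the statement is the Claim_ definition above) =====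
theorem parse_spec : Claim_equal_parse := by
  intro text _
  show parse text = parse_alt text
  unfold parse parse_alt
  dsimp only
  obtain ⟨D, cid, hfold, hitems⟩ :=
    pvOuterA_spec (PySem.Chars.splitOn text.toList ['\n']) [] PySem.Dict.empty 0 0
      (by intro k hmem; simp [PySem.Dict.keys, PySem.Dict.empty] at hmem)
  simp only [List.length_nil, Nat.cast_zero, List.nil_append] at hfold hitems
  rw [hfold]
  simp only [Prod.mk.injEq]
  refine ⟨?_, ?_, ?_⟩
  · rw [hitems]
    have h := pvAllCartsB (PySem.Chars.splitOn text.toList ['\n']) 0 0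
    simp only [Nat.cast_zero] at h
    rw [← h]
    simp [PySem.Dict.empty]
  · trivial
  · exact pvMaxFold _ 0
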